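-- pv_equiv track=rewrite | github.com/YevheniiMelnikov/GymAI | bot/utils/diet_plans.py | normalize_diet_products
-- ===== SOURCE A (Python) =====
-- from typing import Iterable
--
-- DIET_PRODUCT_OPTIONS: tuple[str, ...] = (
--     "plant_food",
--     "meat",
--     "fish_seafood",
--     "eggs",
--     "dairy",
-- )
--
-- def normalize_diet_products(raw: object) -> list[str]:
--     if isinstance(raw, (str, bytes)):
--         return []
--     if not isinstance(raw, Iterable):
--         return []
--     items = [item for item in raw if isinstance(item, str)]
--     allowed = {item for item in items if item in DIET_PRODUCT_OPTIONS}
--     return [item for item in DIET_PRODUCT_OPTIONS if item in allowed]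
-- ===== SOURCE B (Python) =====
-- from typing import Iterable
--
-- DIET_PRODUCT_OPTIONS: tuple[str, ...] = (
--     "plant_food",
--     "meat",
--     "fish_seafood",
--     "eggs",
--     "dairy",
-- )
--
-- _ORDER = {p: i for i, p in enumerate(DIET_PRODUCT_OPTIONS)}
--
--
-- def normalize_diet_products(raw: object) -> list[str]:
--     if isinstance(raw, (str, bytes)):
--         return []
--     if not isinstance(raw, Iterable):
--         return []
--     present = set()
--     for item in raw:
--         if isinstance(item, str) and item in _ORDER:
--             present.add(item)
--     return sorted(present, key=_ORDER.__getitem__)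
-- ===== Notes on version B (the rewrite author's own statement) =====
-- stated objective: alternative
-- what changed: A's final pass scans the canonical tuple testing membership in a set built from two list comprehensions; B builds a product->rank table once, collects matching items into a set in a single loop over raw, and produces the canonical order by sorting the set on rank.
import Mathlib
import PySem

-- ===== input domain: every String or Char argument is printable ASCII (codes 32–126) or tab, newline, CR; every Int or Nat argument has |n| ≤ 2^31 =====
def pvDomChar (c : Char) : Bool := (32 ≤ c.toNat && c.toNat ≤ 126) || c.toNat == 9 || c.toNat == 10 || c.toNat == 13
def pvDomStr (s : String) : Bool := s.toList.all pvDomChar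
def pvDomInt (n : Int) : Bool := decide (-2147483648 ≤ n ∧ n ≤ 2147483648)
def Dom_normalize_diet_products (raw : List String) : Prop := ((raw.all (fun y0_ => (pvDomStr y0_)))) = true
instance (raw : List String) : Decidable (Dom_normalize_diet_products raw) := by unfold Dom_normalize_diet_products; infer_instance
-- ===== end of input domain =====

-- B replaces A's final scan of the canonical tuple by a one-pass collection into a set
-- keyed by a precomputed rank table, followed by a sort on the ranks (objective: alternative).
-- Under the type convention raw : List String, A's str/bytes and non-Iterable guards never
-- fire and every item is a str, so those guards have no Lean counterpart.

-- ===== PORT A =====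
def dietOptions : List String := ["plant_food", "meat", "fish_seafood", "eggs", "dairy"]

def normalize_diet_products (raw : List String) : List String :=
  -- items = [item for item in raw if isinstance(item, str)]  (always true on List String)
  let items := raw.filter (fun _ => true)
  -- allowed = {item for item in items if item in DIET_PRODUCT_OPTIONS}
  let allowed : PySem.Set String := PySem.Set.ofList (items.filter (fun item => dietOptions.contains item))
  -- [item for item in DIET_PRODUCT_OPTIONS if item in allowed]
  dietOptions.filter (fun item => allowed.contains item)

-- ===== PORT B =====
-- _ORDER = {p: i for i, p in enumerate(DIET_PRODUCT_OPTIONS)}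
def dietOrder : PySem.Dict String Int :=
  (PySem.List.enumerate dietOptions).foldl (fun d iv => d.insert iv.2 iv.1) PySem.Dict.empty

def normalize_diet_products_alt (raw : List String) : List String :=
  -- present = set();  for item in raw: if isinstance(item, str) and item in _ORDER: present.add(item)
  let present : PySem.Set String :=
    raw.foldl (fun s item => if PySem.Dict.contains dietOrder item then PySem.Set.add s item else s)
      PySem.Set.empty
  -- sorted(present, key=_ORDER.__getitem__); every element of present is a key of _ORDER,
  -- so __getitem__ never raises and equals getD with any default
  PySem.List.sorted present (fun p => PySem.Dict.getD dietOrder p 0) false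

-- ===== PRECONDITION & SPEC =====
def Spec_normalize_diet_products (raw : List String) (out : List String) : Prop := out = normalize_diet_products_alt raw
instance (raw : List String) (out : List String) : Decidable (Spec_normalize_diet_products raw out) := by unfold Spec_normalize_diet_products; infer_instance

-- ===== CLAIM (what is proved, stated in full; the proofs are below) =====
def Claim_equal_normalize_diet_products : Prop := ∀ (raw : List String), Dom_normalize_diet_products raw → Spec_normalize_diet_products raw (normalize_diet_products raw)

-- ===== LEMMAS AND PROOFS =====

-- The rank table has exactly the canonical products as keys.
theorem contains_dietOrder (s : String) :
    PySem.Dict.contains dietOrder s = dietOptions.contains s := by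
  rw [PySem.Dict.contains_eq_isSome_get?]
  have h : dietOrder = PySem.Dict.mk
      [("plant_food",0),("meat",1),("fish_seafood",2),("eggs",3),("dairy",4)] := by decide
  rw [h]
  simp only [dietOptions, List.contains_cons, List.contains_nil, PySem.Dict.get?]
  by_cases h1 : s = "plant_food" <;> by_cases h2 : s = "meat" <;> by_cases h3 : s = "fish_seafood" <;>
    by_cases h4 : s = "eggs" <;> by_cases h5 : s = "dairy" <;>
    first
      | (subst h1; decide) | (subst h2; decide) | (subst h3; decide) | (subst h4; decide)
      | (subst h5; decide)
      | (simp [Ne.symm h1, Ne.symm h2, Ne.symm h3, Ne.symm h4, Ne.symm h5, h1, h2, h3, h4, h5])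

-- B's conditional-add loop is set(filter(p, xs)).
theorem foldl_add_if_eq_ofList_filter (xs : List String) (p : String → Bool)
    (acc : PySem.Set String) :
    xs.foldl (fun s i => if p i then PySem.Set.add s i else s) acc
      = (xs.filter p).foldl PySem.Set.add acc := by
  induction xs generalizing acc with
  | nil => rfl
  | cons x t ih =>
      by_cases hx : p x = true <;> simp [hx, ih]

theorem pvAB_eq (raw : List String) :
    normalize_diet_products raw = normalize_diet_products_alt raw := by
  unfold normalize_diet_products normalize_diet_products_alt
  simp only [List.filter_true]
  have hpres :
      raw.foldl (fun s item => if PySem.Dict.contains dietOrder item then PySem.Set.add s item else s)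
          PySem.Set.empty
        = PySem.Set.ofList (raw.filter (fun item => dietOptions.contains item)) := by
    simp only [contains_dietOrder]
    rw [foldl_add_if_eq_ofList_filter, PySem.Set.ofList_eq_foldl]
    rfl
  rw [hpres]
  -- name the sorted order: A's output is a strictly-rank-increasing rearrangement of present
  symm
  apply PySem.List.sorted_eq_of_perm_of_pairwise_lt
  · -- Perm: both sides are nodup lists with the same members
    rw [List.perm_ext_iff_of_nodup (List.Nodup.filter _ (by decide : dietOptions.Nodup))
      (PySem.Set.nodup_ofList _)]
    intro a
    simp [PySem.Set.mem_ofList, List.mem_filter]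
  · -- the canonical list is strictly increasing in rank, hence so is its filter
    exact List.Pairwise.filter _ (by decide :
      dietOptions.Pairwise (fun a b => PySem.Dict.getD dietOrder a 0 < PySem.Dict.getD dietOrder b 0))

-- ===== VERDICT (by name: the statement is the Claim_ definition above) =====
theorem normalize_diet_products_spec : Claim_equal_normalize_diet_products := by
  intro raw _
  unfold Spec_normalize_diet_products
  exact pvAB_eq raw
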